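-- pv_equiv track=rewrite | github.com/crosswordnexus/umiaq | umiaq_split.py | generate_partitions
-- ===== SOURCE A (Python) =====
-- from typing import List, Dict, Tuple
--
-- def generate_partitions(string: str, num_partitions: int) -> List[List[str]]:
--     """
--     Generate all non-zero-length partitions of a string into a given number of partitions.
--     :param string: The input string to partition.
--     :param num_partitions: The number of partitions to generate.
--     :return: A list of partitions, each represented as a list of substrings.
--     """
--     def helper(start: int, partitions: List[str]):
--         # If we've filled the required number of partitions
--         if len(partitions) == num_partitions - 1:
--             # The last partition takes the remaining substring
--             remaining = string[start:]
--             if remaining:  # Ensure it's non-zero-length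
--                 results.append(partitions + [remaining])
--             return
--
--         # Iterate over possible splits for the current partition
--         for end in range(start + 1, len(string) - (num_partitions - len(partitions) - 1) + 1):
--             helper(end, partitions + [string[start:end]])
--
--     results = []
--     helper(0, [])
--     return results
-- ===== SOURCE B (Python) =====
-- from itertools import combinations
-- from typing import List
--
-- def generate_partitions(string: str, num_partitions: int) -> List[List[str]]:
--     n = len(string)
--     if num_partitions < 1 or n < num_partitions:
--         return []
--     result = []
--     for cuts in combinations(range(1, n), num_partitions - 1):
--         bounds = [0, *cuts, n]
--         result.append([string[i:j] for i, j in zip(bounds, bounds[1:])])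
--     return result
-- ===== Notes on version B (the rewrite author's own statement) =====
-- stated objective: idiomatic
-- what changed: Replaces A's recursive accumulator search (one recursion level per partition placed, appending to a shared results list) with a direct enumeration of the num_partitions-1 cut positions via itertools.combinations, slicing the string at each cut tuple.
import Mathlib
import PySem

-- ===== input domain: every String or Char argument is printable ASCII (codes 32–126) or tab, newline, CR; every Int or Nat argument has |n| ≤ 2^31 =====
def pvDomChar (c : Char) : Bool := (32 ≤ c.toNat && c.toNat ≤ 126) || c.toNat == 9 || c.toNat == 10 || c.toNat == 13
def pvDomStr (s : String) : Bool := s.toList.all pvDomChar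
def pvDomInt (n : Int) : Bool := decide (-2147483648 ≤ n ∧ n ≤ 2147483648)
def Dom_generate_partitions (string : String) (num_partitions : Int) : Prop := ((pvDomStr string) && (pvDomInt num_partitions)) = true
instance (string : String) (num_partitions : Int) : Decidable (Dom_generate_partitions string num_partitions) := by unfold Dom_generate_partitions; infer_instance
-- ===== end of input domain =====

-- B replaces A's recursive accumulator search with a direct enumeration of the
-- num_partitions-1 cut positions via itertools.combinations (objective: idiomatic).

-- ===== PORT A =====
-- A's inner `helper`, transliterated. Python A recurses one level per partition added;
-- the `fuel` argument only bounds that depth (for num_partitions ≤ 0 Python A recurses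
-- forever and raises RecursionError — those inputs are outside Pre_).
def pvHelperA (string : String) (num_partitions : Int) :
    Nat → Int → List String → List (List String) → List (List String)
  | fuel, start, partitions, results =>
    if (partitions.length : Int) = num_partitions - 1 then
      -- the last partition takes the remaining substring; keep it only if non-empty
      let remaining := PySem.Str.slice string (some start) none
      if remaining = "" then results else results ++ [partitions ++ [remaining]]
    else
      match fuel with
      | 0 => results   -- unreachable for num_partitions ≥ 1 (fuel = num_partitions.toNat suffices)
      | fuel' + 1 =>
        (PySem.List.pyRange (start + 1)
            (PySem.Str.len string - (num_partitions - (partitions.length : Int) - 1) + 1)).foldl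
          (fun res e =>
            pvHelperA string num_partitions fuel' e
              (partitions ++ [PySem.Str.slice string (some start) (some e)]) res)
          results

def generate_partitions (string : String) (num_partitions : Int) : List (List String) :=
  pvHelperA string num_partitions num_partitions.toNat 0 [] []

-- ===== PORT B =====
-- [string[i:j] for i, j in zip(bounds, bounds[1:])]
def pvSliceParts (string : String) (bounds : List Int) : List String :=
  (bounds.zip bounds.tail).map (fun p => PySem.Str.slice string (some p.1) (some p.2))

def generate_partitions_alt (string : String) (num_partitions : Int) : List (List String) :=
  let n : Int := PySem.Str.len string
  if num_partitions < 1 ∨ n < num_partitions then []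
  else
    (PySem.List.combinations (PySem.List.pyRange 1 n) (num_partitions - 1).toNat).map
      (fun cuts => pvSliceParts string (0 :: cuts ++ [n]))

-- ===== PRECONDITION & SPEC =====
-- Pre_ excludes exactly num_partitions ≤ 0, where Python A raises RecursionError.
def Pre_generate_partitions (string : String) (num_partitions : Int) : Prop :=
  1 ≤ num_partitions
instance (string : String) (num_partitions : Int) : Decidable (Pre_generate_partitions string num_partitions) := by unfold Pre_generate_partitions; infer_instance

def pvWitness_generate_partitions : String × Int := ("abc", 2)

def Spec_generate_partitions (string : String) (num_partitions : Int) (out : List (List String)) : Prop := out = generate_partitions_alt string num_partitions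
instance (string : String) (num_partitions : Int) (out : List (List String)) : Decidable (Spec_generate_partitions string num_partitions out) := by unfold Spec_generate_partitions; infer_instance

-- ===== CLAIM (what is proved, stated in full; the proofs are below) =====
def Claim_equal_generate_partitions : Prop := ∀ (string : String) (num_partitions : Int), Dom_generate_partitions string num_partitions → Pre_generate_partitions string num_partitions → Spec_generate_partitions string num_partitions (generate_partitions string num_partitions)


-- ===== LEMMAS AND PROOFS =====

-- Common specification: pvParts s r c = all ways to split s[c:] into r non-empty parts,
-- in increasing (lexicographic) order of the cut positions.
def pvParts (s : String) : Nat → Nat → List (List String)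
  | 0, _ => []
  | 1, c => if c < s.toList.length then [[PySem.Str.slice s (some (c : Int)) none]] else []
  | (r+2), c =>
    (List.range' (c+1) (s.toList.length - (r+1) - c)).flatMap
      (fun e => (pvParts s (r+1) e).map
        (fun t => PySem.Str.slice s (some (c : Int)) (some (e : Int)) :: t))

def pvSlices (s : String) : Nat → List Nat → List String
  | c, [] => [PySem.Str.slice s (some (c : Int)) (some (s.toList.length : Int))]
  | c, e :: cuts => PySem.Str.slice s (some (c : Int)) (some (e : Int)) :: pvSlices s e cuts

lemma pvSlice_to_end (s : String) (c : Nat) :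
    PySem.Str.slice s (some (c : Int)) (some (s.toList.length : Int))
      = PySem.Str.slice s (some (c : Int)) none := by
  simp [PySem.Str.slice, PySem.Chars.slice_eq_listSlice, PySem.List.slice_natCast,
    PySem.List.slice_from_natCast]
  congr 1
  apply List.take_of_length_le
  simp
lemma pvParts_nil (s : String) (r c : Nat) (h : s.toList.length < c + r) :
    pvParts s r c = [] := by
  have hl : s.toList.length = s.length := by simp
  match r with
  | 0 => rfl
  | 1 => simp [pvParts]; omega
  | (r+2) =>
    have : s.length - (r + 1) - c = 0 := by omega
    simp [pvParts, hl, this]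
lemma pyRange_cast (a : Nat) (b : Int) :
    PySem.List.pyRange (a : Int) b
      = List.map (fun k : Nat => (k : Int)) (List.range' a (b - (a : Int)).toNat) := by
  rw [PySem.List.pyRange_one, List.range'_eq_map_range, List.map_map]
  congr 1
lemma pyRange_cast1 (b : Int) :
    PySem.List.pyRange 1 b
      = List.map (fun k : Nat => (k : Int)) (List.range' 1 (b.toNat - 1)) := by
  have h := pyRange_cast 1 b
  norm_num at h
  exact h

lemma pvComb_range' : ∀ (m r a : Nat),
    PySem.List.combinations (List.range' a m) (r+1)
      = (List.range' a (m - r)).flatMap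
          (fun c => (PySem.List.combinations (List.range' (c+1) (a + m - 1 - c)) r).map
            (fun t => c :: t)) := by
  intro m
  induction m with
  | zero => intro r a; simp [PySem.List.combinations_nil_succ]
  | succ m ih =>
    intro r a
    rw [List.range'_succ, PySem.List.combinations_cons_succ]
    by_cases hr : r ≤ m
    · have h1 : m + 1 - r = (m - r) + 1 := by omega
      rw [h1, List.range'_succ, List.flatMap_cons]
      have h2 : a + (m + 1) - 1 - a = m := by omega
      rw [h2, ih r (a+1)]
      congr 1
      apply List.flatMap_congr
      intro c hc
      have : a + 1 + m - 1 - c = a + (m + 1) - 1 - c := by omega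
      rw [this]
    · have h1 : m + 1 - r = 0 := by omega
      have h2 : m - r = 0 := by omega
      have hlen : (List.range' (a+1) m).length < r := by simp; omega
      rw [h1]
      simp [PySem.List.combinations_eq_nil_of_length_lt _ hlen]
      have hlen2 : (List.range' (a+1) m).length < r + 1 := by simp; omega
      simp [PySem.List.combinations_eq_nil_of_length_lt _ hlen2]
lemma pvSliceParts_eq_pvSlices (s : String) :
    ∀ (cuts : List Nat) (c : Nat),
      pvSliceParts s ((c : Int) :: List.map (fun k : Nat => (k : Int)) cuts ++ [(s.toList.length : Int)])
        = pvSlices s c cuts := by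
  intro cuts
  induction cuts with
  | nil => intro c; simp [pvSliceParts, pvSlices]
  | cons e rest ih =>
    intro c
    have := ih e
    simp only [pvSliceParts, List.cons_append, List.tail_cons] at this ⊢
    rw [pvSlices]
    exact congrArg _ this
lemma pvCombSlices_eq_pvParts (s : String) :
    ∀ (r c : Nat), c < s.toList.length →
      (PySem.List.combinations (List.range' (c+1) (s.toList.length - 1 - c)) r).map (pvSlices s c)
        = pvParts s (r+1) c := by
  intro r
  induction r with
  | zero =>
    intro c hc
    rw [PySem.List.combinations_zero]
    simp only [List.map_cons, List.map_nil]
    rw [pvSlices, pvParts]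
    rw [if_pos hc, pvSlice_to_end]
  | succ r ih =>
    intro c hc
    set n := s.toList.length with hn
    rw [pvComb_range' (n - 1 - c) r (c+1)]
    rw [List.map_flatMap]
    rw [pvParts]
    have hcnt : n - 1 - c - r = n - (r + 1) - c := by omega
    rw [hcnt]
    apply List.flatMap_congr
    intro e he
    have heb := List.mem_range'_1.mp he
    have hen : e < n := by omega
    have harith : c + 1 + (n - 1 - c) - 1 - e = n - 1 - e := by omega
    rw [harith, List.map_map]
    have hbody : (pvSlices s c) ∘ (fun t => e :: t)
        = (fun t => PySem.Str.slice s (some (c : Int)) (some (e : Int)) :: t) ∘ (pvSlices s e) := by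
      funext t; simp [Function.comp, pvSlices]
    rw [hbody, ← List.map_map, ih e hen]
lemma pvHelperA_eq (s : String) (np : Int) :
    ∀ (fuel r : Nat) (start : Nat) (parts : List String) (results : List (List String)),
      1 ≤ r → (r : Int) = np - parts.length → r ≤ fuel + 1 →
      pvHelperA s np fuel (start : Int) parts results
        = results ++ (pvParts s r start).map (fun t => parts ++ t) := by
  intro fuel
  induction fuel with
  | zero =>
    intro r start parts results hr hrnp hrf
    have hr1 : r = 1 := by omega
    subst hr1
    have hls : s.toList.length = s.length := by simp
    rw [pvHelperA, if_pos (by omega)]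
    simp only []
    rw [pvParts]
    by_cases hlt : start < s.toList.length
    · rw [if_pos hlt]
      rw [if_neg ?hne]
      · simp
      case hne =>
        intro hemp
        have := congrArg String.toList hemp
        simp [PySem.Str.toList_slice, PySem.Chars.slice_eq_listSlice,
          PySem.List.slice_from_natCast] at this
        omega
    · rw [if_neg hlt]
      rw [if_pos ?hemp]
      · simp
      case hemp =>
        have : (PySem.Str.slice s (some (start : Int)) none).toList = [] := by
          simp [PySem.Str.toList_slice, PySem.Chars.slice_eq_listSlice,
            PySem.List.slice_from_natCast]
          omega
        exact String.toList_inj.mp (by simpa using this)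
  | succ fuel ih =>
    intro r start parts results hr hrnp hrf
    match r, hr with
    | 1, _ =>
      -- same base case as fuel = 0
      have hls : s.toList.length = s.length := by simp
      rw [pvHelperA, if_pos (by omega)]
      simp only []
      rw [pvParts]
      by_cases hlt : start < s.toList.length
      · rw [if_pos hlt]
        rw [if_neg ?hne]
        · simp
        case hne =>
          intro hemp
          have := congrArg String.toList hemp
          simp [PySem.Str.toList_slice, PySem.Chars.slice_eq_listSlice,
            PySem.List.slice_from_natCast] at this
          omega
      · rw [if_neg hlt]
        rw [if_pos ?hemp]
        · simp
        case hemp =>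
          have : (PySem.Str.slice s (some (start : Int)) none).toList = [] := by
            simp [PySem.Str.toList_slice, PySem.Chars.slice_eq_listSlice,
              PySem.List.slice_from_natCast]
            omega
          exact String.toList_inj.mp (by simpa using this)
    | (r+2), _ =>
      rw [pvHelperA, if_neg (by omega)]
      have hone : ((start : Nat) : Int) + 1 = (((start + 1 : Nat) : Nat) : Int) := by push_cast; ring
      rw [hone, pyRange_cast (start+1)]
      have hcnt : (PySem.Str.len s - (np - ((parts.length : Nat) : Int) - 1) + 1
            - ((start + 1 : Nat) : Int)).toNat = s.toList.length - (r+1) - start := by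
        simp only [PySem.Str.len]
        omega
      rw [hcnt]
      rw [List.foldl_map]
      rw [PySem.List.foldl_congr_mem _ _
        (fun res (e : Nat) => res ++ (pvParts s (r+1) e).map
          (fun t => (parts ++ [PySem.Str.slice s (some (start : Int)) (some (e : Int))]) ++ t)) _
        ?hcong]
      case hcong =>
        intro acc e he
        exact ih (r+1) e (parts ++ [PySem.Str.slice s (some (start : Int)) (some (e : Int))]) acc
          (by omega) (by simp; omega) (by omega)
      rw [PySem.List.foldl_append_eq_flatMap]
      congr 1
      rw [pvParts, List.map_flatMap]
      apply List.flatMap_congr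
      intro e he
      rw [List.map_map]
      congr 1
      funext t
      simp

-- ===== VERDICT (by name: the statement is the Claim_ definition above) =====
theorem generate_partitions_spec : Claim_equal_generate_partitions := by
  intro s np _ hpre
  unfold Pre_generate_partitions at hpre
  unfold Spec_generate_partitions
  have hA : generate_partitions s np = pvParts s np.toNat 0 := by
    unfold generate_partitions
    have h0 : (0 : Int) = ((0 : Nat) : Int) := rfl
    rw [h0, pvHelperA_eq s np np.toNat np.toNat 0 [] [] (by omega) (by simp; omega) (by omega)]
    simp
  rw [hA]
  unfold generate_partitions_alt
  simp only [PySem.Str.len]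
  by_cases hsmall : ((s.toList.length : Nat) : Int) < np
  · rw [if_pos (Or.inr hsmall)]
    exact pvParts_nil s np.toNat 0 (by omega)
  · rw [if_neg (by omega)]
    have hlen1 : 0 < s.toList.length := by omega
    rw [pyRange_cast1]
    have hc1 : ((s.toList.length : Nat) : Int).toNat = s.toList.length := Int.toNat_natCast _
    rw [hc1, PySem.List.combinations_map, List.map_map]
    have hmap : ∀ cuts ∈ PySem.List.combinations (List.range' 1 (s.toList.length - 1)) (np - 1).toNat,
        ((fun cuts => pvSliceParts s (0 :: cuts ++ [((s.toList.length : Nat) : Int)]))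
            ∘ List.map (fun k : Nat => (k : Int))) cuts = pvSlices s 0 cuts := by
      intro cuts _
      have h2 := pvSliceParts_eq_pvSlices s cuts 0
      rw [Nat.cast_zero] at h2
      simp only [Function.comp_apply]
      exact h2
    rw [List.map_congr_left hmap]
    have := pvCombSlices_eq_pvParts s (np - 1).toNat 0 hlen1
    simp only [Nat.zero_add, Nat.sub_zero] at this
    rw [this]
    congr 1
    omega
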